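-- pv_equiv track=rewrite | github.com/Vaishnavi-Bharadwaj/Acc | acc 2024 questions/headortail.py | solve
-- ===== SOURCE A (Python) =====
-- def solve(s):
--     score=0
--     head_count=0 #to keep track of heads since 3H in a row should end the game
--     for i in range(0,len(s)):
--         if s[i]=='H':
--             score+=2
--             head_count+=1
--         elif s[i]=='T':
--             score=score-1
--             head_count=0
--         if head_count==3:
--             break
--     return score
-- ===== SOURCE B (Python) =====
-- def solve(s):
--     # Locate how far the game runs (3 heads with resets on tails), then score the
--     # played prefix in closed form: each H is +2, each T is -1, others 0.
--     head_count = 0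
--     prefix = []
--     for c in s:
--         prefix.append(c)
--         if c == 'H':
--             head_count += 1
--         elif c == 'T':
--             head_count = 0
--         if head_count == 3:
--             break
--     return 2 * prefix.count('H') - prefix.count('T')
-- ===== Notes on version B (the rewrite author's own statement) =====
-- stated objective: simpler
-- what changed: B separates locating the stop point (a loop tracking only head_count and the played prefix) from scoring, which it computes in closed form as 2*count('H') - count('T') of the prefix, instead of A's fused score-accumulating loop.
import Mathlib
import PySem

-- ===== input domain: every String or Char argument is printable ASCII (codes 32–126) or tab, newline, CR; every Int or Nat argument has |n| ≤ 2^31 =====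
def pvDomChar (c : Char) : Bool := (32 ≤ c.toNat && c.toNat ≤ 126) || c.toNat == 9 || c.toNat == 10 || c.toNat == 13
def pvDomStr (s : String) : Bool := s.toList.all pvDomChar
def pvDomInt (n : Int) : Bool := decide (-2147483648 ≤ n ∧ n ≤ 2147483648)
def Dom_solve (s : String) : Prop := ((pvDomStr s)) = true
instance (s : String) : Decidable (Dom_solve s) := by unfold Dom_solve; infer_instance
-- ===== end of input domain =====

-- B separates locating the game's stop point from scoring the played prefix in closed form
-- (objective: simpler decomposition; same O(n) cost; return-value equivalence, no mutation involved).

-- ===== PORT A =====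
-- A's for-loop over s with break, carrying (score, head_count), as structural recursion.
def solveLoop : List Char → Int → Int → Int
  | [], score, _ => score
  | c :: cs, score, head_count =>
    let score := if c = 'H' then score + 2 else if c = 'T' then score - 1 else score
    let head_count := if c = 'H' then head_count + 1 else if c = 'T' then 0 else head_count
    if head_count = 3 then score else solveLoop cs score head_count

def solve (s : String) : Int := solveLoop s.toList 0 0

-- ===== PORT B =====
-- B's loop: build the played prefix, tracking only head_count, breaking at 3.
def solvePrefix : List Char → Int → List Char
  | [], _ => []
  | c :: cs, head_count =>
    let head_count := if c = 'H' then head_count + 1 else if c = 'T' then 0 else head_count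
    c :: (if head_count = 3 then [] else solvePrefix cs head_count)

def solve_alt (s : String) : Int :=
  let pfx := solvePrefix s.toList 0
  2 * (PySem.List.count pfx 'H') - (PySem.List.count pfx 'T')

-- ===== PRECONDITION & SPEC =====
def Spec_solve (s : String) (out : Int) : Prop := out = solve_alt s
instance (s : String) (out : Int) : Decidable (Spec_solve s out) := by unfold Spec_solve; infer_instance

-- ===== CLAIM (what is proved, stated in full; the proofs are below) =====
def Claim_equal_solve : Prop := ∀ (s : String), Dom_solve s → Spec_solve s (solve s)

-- ===== LEMMAS AND PROOFS =====
theorem solveLoop_eq_count (l : List Char) :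
    ∀ score hc : Int, solveLoop l score hc =
      score + 2 * (PySem.List.count (solvePrefix l hc) 'H')
            - (PySem.List.count (solvePrefix l hc) 'T') := by
  induction l with
  | nil => intro score hc; simp [solveLoop, solvePrefix, PySem.List.count]
  | cons c cs ih =>
    intro score hc
    simp only [solveLoop, solvePrefix]
    by_cases hH : c = 'H'
    · subst hH
      by_cases h3 : hc + 1 = 3
      · simp [h3, PySem.List.count]
      · simp [h3, ih, PySem.List.count]; ring
    · by_cases hT : c = 'T'
      · subst hT
        simp [hH, ih, PySem.List.count]
        ring
      · by_cases h3 : hc = 3 <;>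
          simp [hH, hT, h3, ih, PySem.List.count]

-- ===== VERDICT (by name: the statement is the Claim_ definition above) =====
theorem solve_spec : Claim_equal_solve := by
  intro s _
  unfold Spec_solve solve solve_alt
  simpa using solveLoop_eq_count s.toList 0 0
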